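-- pv_equiv track=rewrite | github.com/WillCurran/MPC_Robotics | src/utils.py | equality
-- ===== SOURCE A (Python) =====
-- import math
--
-- def bitmask(i, j):
--     assert(j >= i)
--     return ((1 << (j+1 - i)) - 1) << i
--
-- def equality(a, b, n):
--     # compute equality circuit (XOR -- NOT)
--     if n == 1:
--         # flip bits and bitmask, just like the circuit does for a NOT gate
--         return ~(a ^ b) & 1
--     # compute and circuit between two results
--     half1 = math.floor(n/2.0)
--     half2 = math.ceil(n/2.0)
--     a_1 = a & bitmask(0, half1-1)
--     b_1 = b & bitmask(0, half1-1)
--     a_2 = (a >> half1) & bitmask(0, half2-1)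
--     b_2 = (b >> half1) & bitmask(0, half2-1)
--     return equality(a_1, b_1, half1) & equality(a_2, b_2, half2)
-- ===== SOURCE B (Python) =====
-- def equality(a, b, n):
--     # the low n bits of a and b agree iff a and b are congruent mod 2**n
--     m = 1 << n
--     return 1 if a % m == b % m else 0
-- ===== Notes on version B (the rewrite author's own statement) =====
-- stated objective: faster
-- what changed: A builds a recursive divide-and-conquer XOR/NOT/AND bit-circuit over halves of the bit range; B replaces the whole recursion by a single comparison of a and b modulo 2**n.
import Mathlib
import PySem

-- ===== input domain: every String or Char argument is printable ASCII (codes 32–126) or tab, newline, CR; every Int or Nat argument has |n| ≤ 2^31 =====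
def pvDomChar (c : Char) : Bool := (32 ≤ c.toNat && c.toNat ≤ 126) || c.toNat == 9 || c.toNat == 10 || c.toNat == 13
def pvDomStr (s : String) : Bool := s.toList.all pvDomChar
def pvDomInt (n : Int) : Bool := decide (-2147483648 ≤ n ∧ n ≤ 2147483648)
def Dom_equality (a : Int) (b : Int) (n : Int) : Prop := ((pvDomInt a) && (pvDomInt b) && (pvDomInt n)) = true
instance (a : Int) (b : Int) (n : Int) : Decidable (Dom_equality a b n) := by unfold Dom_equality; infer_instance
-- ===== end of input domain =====

-- B replaces A's recursive divide-and-conquer bit circuit by a single comparison of a and b modulo 2^n (alternative algorithm; return value only).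

-- ===== PORT A =====
-- Python: assert(j >= i); ((1 << (j+1 - i)) - 1) << i
-- `.toNat` is exact where Python returns (j+1-i ≥ 1 under the assert, 0 ≤ i here);
-- for j < i Python raises AssertionError (such calls are excluded by Pre_equality).
def bitmask (i : Int) (j : Int) : Int :=
  (((1 : Int) <<< (j + 1 - i).toNat) - 1) <<< i.toNat

def equality (a : Int) (b : Int) (n : Int) : Int :=
  if n = 1 then
    -- ~(a ^ b) & 1
    PySem.Int.band (Int.not (PySem.Int.bxor a b)) 1
  else if n < 2 then 0 -- Python raises AssertionError inside bitmask for n ≤ 0 (outside Pre_); guard for totality only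
  else
    let half1 := PySem.Int.floordiv n 2        -- math.floor(n/2.0), exact for |n| ≤ 2^31
    let half2 := PySem.Int.floordiv (n + 1) 2  -- math.ceil(n/2.0), exact for |n| ≤ 2^31
    let a1 := PySem.Int.band a (bitmask 0 (half1 - 1))
    let b1 := PySem.Int.band b (bitmask 0 (half1 - 1))
    let a2 := PySem.Int.band (a >>> half1.toNat) (bitmask 0 (half2 - 1))  -- `>>` ; half1 ≥ 1 here so .toNat is exact
    let b2 := PySem.Int.band (b >>> half1.toNat) (bitmask 0 (half2 - 1))
    PySem.Int.band (equality a1 b1 half1) (equality a2 b2 half2)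
termination_by n.toNat
decreasing_by
  all_goals simp only [PySem.Int.floordiv_eq_ediv_of_pos (by omega : (0:Int) < 2)]
  all_goals omega

-- ===== PORT B =====
def equality_alt (a : Int) (b : Int) (n : Int) : Int :=
  let m := (1 : Int) <<< n.toNat  -- 1 << n; Python raises for n < 0 (outside Pre_), .toNat exact for n ≥ 0
  if PySem.Int.mod a m = PySem.Int.mod b m then 1 else 0

-- ===== PRECONDITION & SPEC =====
-- Pre_ excludes exactly n ≤ 0: there A's bitmask hits `assert(j >= i)` and raises AssertionError.
def Pre_equality (a : Int) (b : Int) (n : Int) : Prop := 1 ≤ n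
instance (a : Int) (b : Int) (n : Int) : Decidable (Pre_equality a b n) := by unfold Pre_equality; infer_instance
def pvWitness_equality : Int × Int × Int := (5, 7, 3)

def Spec_equality (a : Int) (b : Int) (n : Int) (out : Int) : Prop := out = equality_alt a b n
instance (a : Int) (b : Int) (n : Int) (out : Int) : Decidable (Spec_equality a b n out) := by unfold Spec_equality; infer_instance

-- ===== CLAIM (what is proved, stated in full; the proofs are below) =====
def Claim_equal_equality : Prop := ∀ (a : Int) (b : Int) (n : Int), Dom_equality a b n → Pre_equality a b n → Spec_equality a b n (equality a b n)

-- ===== LEMMAS AND PROOFS =====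

theorem natXor_mod_two (m n : Nat) : (m ^^^ n) % 2 = (m + n) % 2 := by
  have h := Nat.testBit_xor m n 0
  simp [Nat.testBit_zero] at h
  rcases Nat.mod_two_eq_zero_or_one m with hm | hm <;>
    rcases Nat.mod_two_eq_zero_or_one n with hn | hn <;>
      simp [hm, hn] at h ⊢ <;> omega

theorem bxor_emod_two (a b : Int) : PySem.Int.bxor a b % 2 = (a + b) % 2 := by
  unfold PySem.Int.bxor
  split_ifs <;>
    first
    | (have h := natXor_mod_two a.toNat b.toNat; omega)
    | (have h := natXor_mod_two a.toNat (-b - 1).toNat; omega)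
    | (have h := natXor_mod_two (-a - 1).toNat b.toNat; omega)
    | (have h := natXor_mod_two (-a - 1).toNat (-b - 1).toNat; omega)

theorem int_not_eq (x : Int) : Int.not x = -x - 1 := by
  cases x <;> simp [Int.not, Int.negSucc_eq] <;> ring

theorem base_case (a b : Int) :
    PySem.Int.band (Int.not (PySem.Int.bxor a b)) 1 = if a % 2 = b % 2 then 1 else 0 := by
  rw [PySem.Int.band_one, PySem.Int.mod_eq_emod_of_pos (by norm_num), int_not_eq]
  have h := bxor_emod_two a b
  generalize PySem.Int.bxor a b = t at h ⊢
  split_ifs <;> omega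

theorem shiftRight_div (a : Int) (k : Nat) : a >>> k = a / 2 ^ k := by
  cases a with
  | ofNat m =>
      show (Int.ofNat (m >>> k)) = _
      rw [Nat.shiftRight_eq_div_pow]
      simpa using (Int.ofNat_div m (2 ^ k)).symm
  | negSucc m =>
      show (Int.negSucc (m >>> k)) = _
      rw [Nat.shiftRight_eq_div_pow]
      have hlt : (m % 2 ^ k : Nat) < 2 ^ k := Nat.mod_lt _ (by positivity)
      have key : (m : Int) = 2 ^ k * ((m / 2 ^ k : Nat) : Int) + ((m % 2 ^ k : Nat) : Int) := by
        exact_mod_cast (Nat.div_add_mod m (2 ^ k)).symm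
      have h1 : (Int.negSucc m) =
          ((2 ^ k - 1 - (m % 2 ^ k : Nat)) : Int) + (2 ^ k : Int) * (-(m / 2 ^ k : Nat) - 1) := by
        rw [Int.negSucc_eq]; linear_combination -key
      rw [Int.negSucc_eq, h1, Int.add_mul_ediv_left _ _ (by positivity : (0:Int) < 2 ^ k).ne']
      rw [Int.ediv_eq_zero_of_lt (by push_cast; omega) (by push_cast; omega)]
      push_cast
      ring

theorem band_mask (a : Int) (k : Nat) : PySem.Int.band a ((2 : Int) ^ k - 1) = a % 2 ^ k := by
  have hN1 : 1 ≤ (2:Nat) ^ k := Nat.one_le_two_pow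
  have hpow : ((2 ^ k : Nat) : Int) = (2 : Int) ^ k := by push_cast; ring
  rw [← hpow]
  unfold PySem.Int.band
  have hknat : (((2 ^ k : Nat) : Int) - 1).toNat = 2 ^ k - 1 := by omega
  by_cases ha : 0 ≤ a
  · rw [if_pos ha, if_pos (by omega : (0:Int) ≤ ((2 ^ k : Nat) : Int) - 1)]
    rw [hknat, Nat.and_two_pow_sub_one_eq_mod]
    have h1 : ((a.toNat % 2 ^ k : Nat) : Int) = (a.toNat : Int) % ((2 ^ k : Nat) : Int) := by
      push_cast; ring
    rw [h1, Int.toNat_of_nonneg ha]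
  · rw [if_neg ha, if_pos (by omega : (0:Int) ≤ ((2 ^ k : Nat) : Int) - 1)]
    rw [hknat, Nat.and_comm, Nat.and_two_pow_sub_one_eq_mod]
    set p := (-a - 1).toNat with hpdef
    have hp : (p : Int) = -a - 1 := by omega
    have hdm : (p : Int) = ((2 ^ k : Nat) : Int) * ((p / 2 ^ k : Nat) : Int) + ((p % 2 ^ k : Nat) : Int) := by
      exact_mod_cast (Nat.div_add_mod p (2 ^ k)).symm
    have hlt : (p % 2 ^ k : Nat) < 2 ^ k := Nat.mod_lt _ (by positivity)
    have hae : a = (((2 ^ k : Nat) : Int) - 1 - ((p % 2 ^ k : Nat) : Int))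
        + ((2 ^ k : Nat) : Int) * (-((p / 2 ^ k : Nat) : Int) - 1) := by
      linear_combination hp - hdm
    have h2 : ((2 ^ k - 1 - p % 2 ^ k : Nat) : Int) = ((2 ^ k : Nat) : Int) - 1 - ((p % 2 ^ k : Nat) : Int) := by
      omega
    rw [h2, hae, Int.add_mul_emod_self_left,
      Int.emod_eq_of_lt (by omega) (by omega)]

theorem emod_decomp (d1 d2 a : Int) (h1 : 0 < d1) :
    a % (d1 * d2) = d1 * ((a / d1) % d2) + a % d1 := by
  have e1 := Int.emod_def a d1
  have e2 := Int.emod_def (a / d1) d2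
  have e3 := Int.emod_def a (d1 * d2)
  have e4 : a / d1 / d2 = a / (d1 * d2) := Int.ediv_ediv_of_nonneg (le_of_lt h1)
  rw [e1, e2, e3, ← e4]; ring

theorem emod_split (d1 d2 a b : Int) (h1 : 0 < d1) (h2 : 0 < d2) :
    (a % (d1 * d2) = b % (d1 * d2)) ↔ (a % d1 = b % d1 ∧ (a / d1) % d2 = (b / d1) % d2) := by
  have da := emod_decomp d1 d2 a h1
  have db := emod_decomp d1 d2 b h1
  constructor
  · intro h
    have hra : 0 ≤ a % d1 := Int.emod_nonneg a (ne_of_gt h1)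
    have hra' : a % d1 < d1 := Int.emod_lt_of_pos a h1
    have hrb : 0 ≤ b % d1 := Int.emod_nonneg b (ne_of_gt h1)
    have hrb' : b % d1 < d1 := Int.emod_lt_of_pos b h1
    have ht : d1 * ((a / d1) % d2 - (b / d1) % d2) = b % d1 - a % d1 := by
      linear_combination h - da + db
    have hdvd : d1 ∣ (b % d1 - a % d1) := ⟨(a / d1) % d2 - (b / d1) % d2, ht.symm⟩
    have hz : b % d1 - a % d1 = 0 := Int.eq_zero_of_abs_lt_dvd hdvd (by rw [abs_lt]; omega)
    have ht0 : (a / d1) % d2 - (b / d1) % d2 = 0 := by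
      rcases mul_eq_zero.mp (by omega : d1 * ((a / d1) % d2 - (b / d1) % d2) = 0) with h' | h'
      · omega
      · exact h'
    exact ⟨by omega, by omega⟩
  · rintro ⟨hr, hx⟩
    rw [da, db, hr, hx]

theorem bitmask_zero (h : Int) (hh : 1 ≤ h) : bitmask 0 (h - 1) = 2 ^ h.toNat - 1 := by
  unfold bitmask
  have e : (h - 1 + 1 - 0) = h := by ring
  rw [e]
  simp [Int.shiftLeft_eq]

theorem equality_eq_mod : ∀ (k : Nat), ∀ (n a b : Int), n.toNat = k → 1 ≤ n →
    equality a b n = if a % 2 ^ k = b % 2 ^ k then 1 else 0 := by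
  intro k
  induction k using Nat.strong_induction_on with
  | _ k ih =>
    intro n a b hk hn
    rw [equality.eq_def]
    by_cases hone : n = 1
    · subst hone
      have hk1 : k = 1 := by omega
      subst hk1
      simp only [pow_one]
      exact base_case a b
    · rw [if_neg hone, if_neg (by omega : ¬ n < 2)]
      have hfd : PySem.Int.floordiv n 2 = n / 2 := PySem.Int.floordiv_eq_ediv_of_pos (by norm_num)
      have hfd2 : PySem.Int.floordiv (n + 1) 2 = (n + 1) / 2 := PySem.Int.floordiv_eq_ediv_of_pos (by norm_num)
      have hH1pos : 1 ≤ n / 2 := by omega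
      have hH2pos : 1 ≤ (n + 1) / 2 := by omega
      have hto : (n / 2).toNat + ((n + 1) / 2).toNat = k := by omega
      have hlt1 : (n / 2).toNat < k := by omega
      have hlt2 : ((n + 1) / 2).toNat < k := by omega
      have hmod1 : ∀ x : Int, x % 2 ^ (n / 2).toNat % 2 ^ (n / 2).toNat = x % 2 ^ (n / 2).toNat :=
        fun x => Int.emod_emod_of_dvd x dvd_rfl
      have hmod2 : ∀ x : Int, x % 2 ^ ((n + 1) / 2).toNat % 2 ^ ((n + 1) / 2).toNat = x % 2 ^ ((n + 1) / 2).toNat :=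
        fun x => Int.emod_emod_of_dvd x dvd_rfl
      simp only [hfd, hfd2, bitmask_zero _ hH1pos, bitmask_zero _ hH2pos, band_mask, shiftRight_div]
      rw [ih (n / 2).toNat hlt1 (n / 2) _ _ rfl hH1pos,
        ih ((n + 1) / 2).toNat hlt2 ((n + 1) / 2) _ _ rfl hH2pos]
      simp only [hmod1, hmod2]
      have hq : (a % 2 ^ k = b % 2 ^ k) ↔
          ((a % 2 ^ (n / 2).toNat = b % 2 ^ (n / 2).toNat) ∧
           ((a / 2 ^ (n / 2).toNat) % 2 ^ ((n + 1) / 2).toNat = (b / 2 ^ (n / 2).toNat) % 2 ^ ((n + 1) / 2).toNat)) := by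
        rw [← hto, pow_add]
        exact emod_split _ _ a b (by positivity) (by positivity)
      rw [if_congr hq rfl rfl]
      by_cases hp1 : a % 2 ^ (n / 2).toNat = b % 2 ^ (n / 2).toNat <;>
        by_cases hp2 : (a / 2 ^ (n / 2).toNat) % 2 ^ ((n + 1) / 2).toNat = (b / 2 ^ (n / 2).toNat) % 2 ^ ((n + 1) / 2).toNat <;>
          simp [hp1, hp2] <;> decide

-- ===== VERDICT (by name: the statement is the Claim_ definition above) =====
theorem equality_spec : Claim_equal_equality := by
  intro a b n _ hpre
  unfold Spec_equality equality_alt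
  have hpos : (0:Int) < (1 : Int) <<< n.toNat := by
    rw [Int.shiftLeft_eq]; positivity
  simp only [PySem.Int.mod_eq_emod_of_pos hpos]
  rw [equality_eq_mod n.toNat n a b rfl hpre, Int.shiftLeft_eq, one_mul]
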